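-- pv_equiv track=rewrite | github.com/williamli9300/quantum-removerelays | removerelays.py | removeRelays
-- ===== SOURCE A (Python) =====
-- def removeRelays(l): # inputs: takes list "l" as lines of text file; outputs: list "noRelays" as lines with relays removed
--     noRelays=[]
--     counter = 0
--     #enum_list = list(enumerate(l))
--     isRelay = False
--     while counter < len(l):
--         '''
--         if enum_list[counter][1][0].isnumeric():
--             if not "relay" in (enum_list[counter][1]).lower():
--                 noRelays.append(enum_list[counter][1])
--                 isRelay = False
--             else:
--                 isRelay = True
--         else:
--             if isRelay == False:
--                 noRelays.append(enum_list[counter][1])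
--         counter +=1
--         '''
--         if l[counter][0].isnumeric():
--             if not "relay" in (l[counter]).lower():
--                 noRelays.append(l[counter])
--                 isRelay = False
--             else:
--                 isRelay = True
--         else:
--             if isRelay == False:
--                 noRelays.append(l[counter])
--         counter+=1
--     return noRelays
-- ===== SOURCE B (Python) =====
-- def removeRelays(l):
--     # Pass 1: group lines into blocks; a line whose first char is numeric starts
--     # a new block (flag = whether it is a relay header); other lines join the
--     # current block (a leading headerless block is never a relay).
--     blocks = [[False, []]]
--     for line in l:
--         if line[0].isnumeric():
--             blocks.append(["relay" in line.lower(), [line]])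
--         else:
--             blocks[-1][1].append(line)
--     # Pass 2: emit every line of every non-relay block.
--     noRelays = []
--     for isRelay, lines in blocks:
--         if not isRelay:
--             noRelays.extend(lines)
--     return noRelays
-- ===== Notes on version B (the rewrite author's own statement) =====
-- stated objective: alternative
-- what changed: A's single stateful scan (an isRelay flag deciding each line as it goes) is replaced by a build-then-consume decomposition: one pass groups the lines into header blocks (a numeric-first-char line starts a block, flagged relay or not; a leading headerless block collects initial lines), and a second pass emits all lines of the non-relay blocks.
import Mathlib
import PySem

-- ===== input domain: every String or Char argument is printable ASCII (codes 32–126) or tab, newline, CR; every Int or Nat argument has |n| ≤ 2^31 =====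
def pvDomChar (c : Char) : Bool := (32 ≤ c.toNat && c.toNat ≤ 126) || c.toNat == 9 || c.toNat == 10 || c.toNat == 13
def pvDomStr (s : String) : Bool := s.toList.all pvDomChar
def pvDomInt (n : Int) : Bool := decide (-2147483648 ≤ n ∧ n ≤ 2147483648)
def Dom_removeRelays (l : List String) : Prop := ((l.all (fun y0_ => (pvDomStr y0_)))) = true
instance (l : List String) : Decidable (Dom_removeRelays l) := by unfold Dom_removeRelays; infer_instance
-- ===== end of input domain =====

-- B replaces A's stateful line-by-line filter by a build-then-consume two-pass
-- decomposition (group lines into header blocks, then emit non-relay blocks); objective: alternative.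

-- ===== PORT A =====
-- one iteration of A's while loop over state (noRelays, isRelay);
-- l[counter][0] is PySem.Str.pyGet? (none = IndexError on an empty line, excluded by Pre_);
-- .isnumeric() on a char of the printable-ASCII domain is exactly isdigit
def removeRelaysStep (st : List String × Bool) (s : String) : List String × Bool :=
  match PySem.Str.pyGet? s 0 with
  | some c =>
      if PySem.Chars.isdigit c then
        if !(PySem.Str.isIn "relay" (PySem.Str.lower s)) then (st.1 ++ [s], false)
        else (st.1, true)
      else
        if st.2 = false then (st.1 ++ [s], st.2) else st
  | none => st  -- IndexError in Python; outside Pre_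

def removeRelays (l : List String) : List String :=
  (l.foldl removeRelaysStep ([], false)).1

-- ===== PORT B =====
-- B's pass 1 body: blocks are kept most-recent-first (Python appends the new block /
-- the new line at the END of the list; here the current block is the head, and the
-- block list is reversed before pass 2 — lines inside a block stay in order)
def removeRelaysAddLine (blocks : List (Bool × List String)) (s : String) :
    List (Bool × List String) :=
  match PySem.Str.pyGet? s 0 with
  | some c =>
      if PySem.Chars.isdigit c then
        (PySem.Str.isIn "relay" (PySem.Str.lower s), [s]) :: blocks
      else
        match blocks with
        | (b, ls) :: rest => (b, ls ++ [s]) :: rest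
        | [] => []  -- unreachable: the block list starts nonempty and never shrinks
  | none => blocks  -- IndexError in Python; outside Pre_

def removeRelays_alt (l : List String) : List String :=
  let blocks := (l.foldl removeRelaysAddLine [(false, [])]).reverse
  blocks.foldl (fun out p => if !p.1 then out ++ p.2 else out) []

-- ===== PRECONDITION & SPEC =====
-- Pre_ excludes lists containing an empty line, on which A raises IndexError (l[counter][0]).
def Pre_removeRelays (l : List String) : Prop := ∀ s ∈ l, s ≠ ""
instance (l : List String) : Decidable (Pre_removeRelays l) := by unfold Pre_removeRelays; infer_instance
def pvWitness_removeRelays : List String := ["head", "1 relay x", "sub1", "2 load", "sub2"]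

def Spec_removeRelays (l : List String) (out : List String) : Prop := out = removeRelays_alt l
instance (l : List String) (out : List String) : Decidable (Spec_removeRelays l out) := by unfold Spec_removeRelays; infer_instance

-- ===== CLAIM (what is proved, stated in full; the proofs are below) =====
def Claim_equal_removeRelays : Prop := ∀ (l : List String), Dom_removeRelays l → Pre_removeRelays l → Spec_removeRelays l (removeRelays l)

-- ===== LEMMAS AND PROOFS =====

-- B's pass 2 (emission) with accumulator []
def pvEmit (bs : List (Bool × List String)) : List String :=
  bs.foldl (fun out p => if !p.1 then out ++ p.2 else out) []

lemma pvEmit_acc (bs : List (Bool × List String)) (a : List String) :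
    bs.foldl (fun out p => if !p.1 then out ++ p.2 else out) a = a ++ pvEmit bs := by
  induction bs generalizing a with
  | nil => simp [pvEmit]
  | cons p bs ih =>
      simp only [pvEmit, List.foldl_cons]
      rw [ih, ih (if !p.1 then [] ++ p.2 else [])]
      cases h : p.1 <;> simp

lemma pvEmit_append (xs ys : List (Bool × List String)) :
    pvEmit (xs ++ ys) = pvEmit xs ++ pvEmit ys := by
  simp only [pvEmit, List.foldl_append]
  rw [pvEmit_acc ys (xs.foldl _ [])]
  rfl

lemma pvEmit_singleton (p : Bool × List String) :
    pvEmit [p] = if !p.1 then p.2 else [] := by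
  cases h : p.1 <;> simp [pvEmit, h]

-- the loop invariant relating A's state to B's block list
lemma pvKey (l : List String) :
    ∀ (b : Bool) (ls : List String) (rest : List (Bool × List String)),
    (l.foldl removeRelaysStep (pvEmit (((b, ls) :: rest).reverse), b)).1
      = pvEmit ((l.foldl removeRelaysAddLine ((b, ls) :: rest)).reverse) := by
  induction l with
  | nil => intro b ls rest; rfl
  | cons s l ih =>
      intro b ls rest
      simp only [List.foldl_cons]
      rw [show removeRelaysStep (pvEmit (((b, ls) :: rest).reverse), b) s
            = match PySem.Str.pyGet? s 0 with
              | some c =>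
                  if PySem.Chars.isdigit c then
                    if !(PySem.Str.isIn "relay" (PySem.Str.lower s)) then
                      (pvEmit (((b, ls) :: rest).reverse) ++ [s], false)
                    else (pvEmit (((b, ls) :: rest).reverse), true)
                  else
                    if b = false then (pvEmit (((b, ls) :: rest).reverse) ++ [s], b)
                    else (pvEmit (((b, ls) :: rest).reverse), b)
              | none => (pvEmit (((b, ls) :: rest).reverse), b) from rfl]
      cases hg : PySem.Str.pyGet? s 0 with
      | none => simp only [removeRelaysAddLine, hg]; exact ih b ls rest
      | some c =>
          simp only [removeRelaysAddLine, hg]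
          by_cases hd : PySem.Chars.isdigit c = true
          · simp only [hd]
            by_cases hr : PySem.Str.isIn "relay" (PySem.Str.lower s) = true
            · simp only [hr]
              have := ih true [s] ((b, ls) :: rest)
              simp only [List.reverse_cons, pvEmit_append, pvEmit_singleton] at this ⊢
              simpa using this
            · have hr' : PySem.Str.isIn "relay" (PySem.Str.lower s) = false :=
                Bool.eq_false_iff.mpr hr
              simp only [hr']
              have := ih false [s] ((b, ls) :: rest)
              simp only [List.reverse_cons, pvEmit_append, pvEmit_singleton] at this ⊢
              simpa using this
          · replace hd : PySem.Chars.isdigit c = false := Bool.eq_false_iff.mpr hd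
            simp only [hd]
            have := ih b (ls ++ [s]) rest
            simp only [List.reverse_cons, pvEmit_append, pvEmit_singleton] at this ⊢
            cases b with
            | false => simpa using this
            | true => simpa using this

-- ===== VERDICT (by name: the statement is the Claim_ definition above) =====
theorem removeRelays_spec : Claim_equal_removeRelays := by
  intro l _ _
  show removeRelays l = removeRelays_alt l
  unfold removeRelays removeRelays_alt
  have := pvKey l false [] []
  simpa [pvEmit] using this
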